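-- pv_equiv track=rewrite | github.com/V0idC0de/AdventOfCode | day1.py | p2_digits_from_line
-- ===== SOURCE A (Python) =====
-- def p2_digits_from_line(line_text: str) -> int:
--     # Finds first and last occurrences of valid search terms for part 2
--     search_terms = {
--         "one": 1, "1": 1,
--         "two": 2, "2": 2,
--         "three": 3, "3": 3,
--         "four": 4, "4": 4,
--         "five": 5, "5": 5,
--         "six": 6, "6": 6,
--         "seven": 7, "7": 7,
--         "eight": 8, "8": 8,
--         "nine": 9, "9": 9,
--     }
--     # Find lowest index of any digit occurrence (first digit)
--     search_term_indices = [(line_text.find(text), value) for text, value in search_terms.items() if line_text.find(text) >= 0]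
--     min_index, min_index_value = min(search_term_indices)
--     # Find highest index of any digit occurrence (last digit)
--     search_term_indices = [(line_text.rfind(text), value) for text, value in search_terms.items() if line_text.rfind(text) >= 0]
--     max_index, max_index_value = max(search_term_indices)
--     # min_index_value is the first (= higher) digit, so it's multiplied by 10, while the last (= lower) digit is just added.
--     # Example: 5 and 2 becomes 50 + 2
--     return min_index_value * 10 + max_index_value
-- ===== SOURCE B (Python) =====
-- def p2_digits_from_line(line_text: str) -> int:
--     # One left-to-right pass over the positions of line_text: at each position test the
--     # 18 terms for a match starting there; first match sets the tens digit, every match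
--     # updates the units digit.
--     terms = [
--         ("one", 1), ("two", 2), ("three", 3), ("four", 4), ("five", 5),
--         ("six", 6), ("seven", 7), ("eight", 8), ("nine", 9),
--         ("1", 1), ("2", 2), ("3", 3), ("4", 4), ("5", 5),
--         ("6", 6), ("7", 7), ("8", 8), ("9", 9),
--     ]
--     first = None
--     last = None
--     for i in range(len(line_text)):
--         for text, value in terms:
--             if line_text.startswith(text, i):
--                 if first is None:
--                     first = value
--                 last = value
--                 break
--     if first is None:
--         raise ValueError("no digit or digit word in line")
--     return first * 10 + last
-- ===== Notes on version B (the rewrite author's own statement) =====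
-- stated objective: simpler
-- what changed: Replaces the term-major double scan (find and rfind for each of the 18 terms, building two index lists and taking the lexicographic min/max of tuples) by a single position-major left-to-right pass that tests the 18 terms at each position and keeps only the first and the last matched value.
import Mathlib
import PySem

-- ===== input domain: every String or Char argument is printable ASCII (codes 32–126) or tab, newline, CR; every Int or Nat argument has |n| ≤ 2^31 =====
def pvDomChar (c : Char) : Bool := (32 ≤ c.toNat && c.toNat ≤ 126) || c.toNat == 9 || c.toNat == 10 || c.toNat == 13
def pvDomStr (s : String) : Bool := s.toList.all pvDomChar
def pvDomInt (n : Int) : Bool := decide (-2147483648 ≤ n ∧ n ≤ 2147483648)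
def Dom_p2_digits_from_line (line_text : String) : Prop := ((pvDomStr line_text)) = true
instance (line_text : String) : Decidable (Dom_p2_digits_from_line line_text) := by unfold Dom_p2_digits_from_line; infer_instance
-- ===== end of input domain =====

-- B replaces the 18-fold term-major find/rfind + min/max scan by ONE position-major
-- left-to-right pass that keeps just the first and last matched values (objective: simpler).


-- ===== PORT A =====
-- A's dict literal has 18 distinct keys, so search_terms.items() iterates exactly this
-- association list in insertion order.
def pvTermsA : List (String × Int) :=
  [("one", 1), ("1", 1), ("two", 2), ("2", 2), ("three", 3), ("3", 3),
   ("four", 4), ("4", 4), ("five", 5), ("5", 5), ("six", 6), ("6", 6),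
   ("seven", 7), ("7", 7), ("eight", 8), ("8", 8), ("nine", 9), ("9", 9)]

def p2_digits_from_line (line_text : String) : Int :=
  -- [(line_text.find(text), value) for text, value in search_terms.items() if line_text.find(text) >= 0]
  let idx1 : List (Int × Int) := pvTermsA.filterMap
    (fun p => if 0 ≤ PySem.Str.find line_text p.1 then some (PySem.Str.find line_text p.1, p.2) else none)
  -- min(search_term_indices): Python tuple min = lexicographic, first extremal; min([]) raises ValueError (outside Pre_)
  match PySem.List.min2? idx1 Prod.fst Prod.snd with
  | none => 0
  | some mn =>
    let idx2 : List (Int × Int) := pvTermsA.filterMap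
      (fun p => if 0 ≤ PySem.Str.rfind line_text p.1 then some (PySem.Str.rfind line_text p.1, p.2) else none)
    match PySem.List.max2? idx2 Prod.fst Prod.snd with
    | none => 0
    | some mx => mn.2 * 10 + mx.2

-- ===== PORT B =====
-- Source B's term list (words first, then digit characters)
def pvTermsB : List (List Char × Int) :=
  [("one".toList, 1), ("two".toList, 2), ("three".toList, 3), ("four".toList, 4), ("five".toList, 5),
   ("six".toList, 6), ("seven".toList, 7), ("eight".toList, 8), ("nine".toList, 9),
   ("1".toList, 1), ("2".toList, 2), ("3".toList, 3), ("4".toList, 4), ("5".toList, 5),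
   ("6".toList, 6), ("7".toList, 7), ("8".toList, 8), ("9".toList, 9)]

-- inner loop 'for text, value in terms: if line_text.startswith(text, i): …; break'
-- (Python's line_text.startswith(text, i) with 0 ≤ i is exactly: text is a prefix of s[i:])
def pvMatchAt (s : List Char) (i : Nat) : Option Int :=
  pvTermsB.findSome? (fun p => if PySem.Chars.startswith (s.drop i) p.1 then some p.2 else none)

-- body of the outer 'for i in range(len(line_text))' loop, state = (first, last)
def pvStep (s : List Char) (st : Option Int × Option Int) (i : Nat) : Option Int × Option Int :=
  match pvMatchAt s i with
  | none => st
  | some v => ((match st.1 with | none => some v | some f => some f), some v)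

def p2_digits_from_line_alt (line_text : String) : Int :=
  let s := line_text.toList
  let st := (List.range s.length).foldl (pvStep s) (none, none)
  match st.1, st.2 with
  | some f, some l => f * 10 + l
  | _, _ => 0  -- Python B raises ValueError here (no match at all); outside Pre_

-- ===== PRECONDITION & SPEC =====
-- Pre_ excludes exactly the lines containing no digit character and no digit word:
-- there A's min([]) raises ValueError (and B raises ValueError as well).
def Pre_p2_digits_from_line (line_text : String) : Prop :=
  pvTermsA.any (fun p => PySem.Str.isIn p.1 line_text) = true
instance (line_text : String) : Decidable (Pre_p2_digits_from_line line_text) := by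
  unfold Pre_p2_digits_from_line; infer_instance

def pvWitness_p2_digits_from_line : String := "x3abctwo"

def Spec_p2_digits_from_line (line_text : String) (out : Int) : Prop := out = p2_digits_from_line_alt line_text
instance (line_text : String) (out : Int) : Decidable (Spec_p2_digits_from_line line_text out) := by unfold Spec_p2_digits_from_line; infer_instance

-- ===== CLAIM (what is proved, stated in full; the proofs are below) =====
def Claim_equal_p2_digits_from_line : Prop := ∀ (line_text : String), Dom_p2_digits_from_line line_text → Pre_p2_digits_from_line line_text → Spec_p2_digits_from_line line_text (p2_digits_from_line line_text)

-- ===== LEMMAS AND PROOFS =====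

-- no term of B's list is a prefix of a different one (checked on the 18×18 literal pairs)
theorem pv_no_prefix : ∀ p ∈ pvTermsB, ∀ q ∈ pvTermsB, p.1.isPrefixOf q.1 = true → p = q := by decide

theorem pv_ne_nil : ∀ p ∈ pvTermsB, p.1 ≠ [] := by decide

-- A's terms, seen on the char-list side, are exactly B's terms (as sets)
theorem pv_A_sub_B : ∀ p ∈ pvTermsA, (p.1.toList, p.2) ∈ pvTermsB := by decide

theorem pv_B_sub_A : ∀ q ∈ pvTermsB, ∃ p ∈ pvTermsA, p.1.toList = q.1 ∧ p.2 = q.2 := by decide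

-- at most one term matches at a given position
theorem pv_uniq {r : List Char} {p q : List Char × Int}
    (hp : p ∈ pvTermsB) (hq : q ∈ pvTermsB) (h1 : p.1 <+: r) (h2 : q.1 <+: r) : p = q := by
  rcases List.prefix_or_prefix_of_prefix h1 h2 with h | h
  · exact pv_no_prefix p hp q hq (List.isPrefixOf_iff_prefix.mpr h)
  · exact (pv_no_prefix q hq p hp (List.isPrefixOf_iff_prefix.mpr h)).symm

-- findSome? returns v when some element maps to v and every element maps to none or v
theorem pv_findSome?_unique {α β : Type} (l : List α) (f : α → Option β) (x : α) (v : β)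
    (hx : x ∈ l) (hv : f x = some v) (hall : ∀ y ∈ l, f y = none ∨ f y = some v) :
    l.findSome? f = some v := by
  induction l with
  | nil => cases hx
  | cons a t ih =>
    rcases List.mem_cons.mp hx with rfl | hx'
    · simp [hv]
    · have hrec := ih hx' (fun y hy => hall y (List.mem_cons_of_mem _ hy))
      rcases hall a (List.mem_cons_self ..) with ha | ha <;> simp [ha, hrec]

theorem pv_matchAt_some_iff (s : List Char) (i : Nat) (v : Int) :
    pvMatchAt s i = some v ↔ ∃ p ∈ pvTermsB, p.1 <+: s.drop i ∧ p.2 = v := by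
  constructor
  · intro h
    obtain ⟨p, hp, hfp⟩ := List.exists_of_findSome?_eq_some h
    by_cases hc : PySem.Chars.startswith (s.drop i) p.1 = true
    · refine ⟨p, hp, ?_, ?_⟩
      · simpa [PySem.Chars.startswith, List.isPrefixOf_iff_prefix] using hc
      · simpa [hc] using hfp
    · simp [hc] at hfp
  · rintro ⟨p, hp, hpre, rfl⟩
    apply pv_findSome?_unique _ _ p _ hp
    · simp [PySem.Chars.startswith, List.isPrefixOf_iff_prefix, hpre]
    · intro y hy
      by_cases hc : PySem.Chars.startswith (s.drop i) y.1 = true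
      · right
        have hyp : y = p := pv_uniq hy hp
          (by simpa [PySem.Chars.startswith, List.isPrefixOf_iff_prefix] using hc) hpre
        subst hyp
        simp [hc]
      · left; simp [hc]

-- a (nonempty-) term matching at i forces i < length
theorem pv_lt_of_match {s t : List Char} {i : Nat} (ht : t ≠ []) (h : t <+: s.drop i) :
    i < s.length := by
  by_contra hn
  rw [List.drop_eq_nil_of_le (by omega)] at h
  exact ht (List.prefix_nil.mp h)

-- ---- min2? / max2? on Int pairs with keys fst, snd ----

-- any fold that at each step keeps the accumulator or takes the new element,
-- never increasing the tracked key, computes an element with minimal key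
theorem pv_foldl_sel_min (step : Option (Int × Int) → (Int × Int) → Option (Int × Int))
    (hstep : ∀ m x, step (some m) x = some m ∨ step (some m) x = some x)
    (hfst : ∀ m x r, step (some m) x = some r → r.1 ≤ m.1 ∧ r.1 ≤ x.1) :
    ∀ (xs : List (Int × Int)) (a m : Int × Int), xs.foldl step (some a) = some m →
      (m = a ∨ m ∈ xs) ∧ m.1 ≤ a.1 ∧ ∀ y ∈ xs, m.1 ≤ y.1 := by
  intro xs
  induction xs with
  | nil => intro a m h; simp_all
  | cons x t ih =>
    intro a m h
    rw [List.foldl_cons] at h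
    rcases hstep a x with hs | hs <;> rw [hs] at h
    · obtain ⟨hm, hle, hall⟩ := ih a m h
      obtain ⟨_, hx⟩ := hfst a x a hs
      refine ⟨?_, hle, ?_⟩
      · rcases hm with rfl | hm'
        · exact Or.inl rfl
        · exact Or.inr (List.mem_cons_of_mem _ hm')
      · intro y hy
        rcases List.mem_cons.mp hy with rfl | hy'
        · omega
        · exact hall y hy'
    · obtain ⟨hm, hle, hall⟩ := ih x m h
      obtain ⟨hxa, _⟩ := hfst a x x hs
      refine ⟨?_, by omega, ?_⟩
      · rcases hm with rfl | hm'
        · exact Or.inr (List.mem_cons_self ..)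
        · exact Or.inr (List.mem_cons_of_mem _ hm')
      · intro y hy
        rcases List.mem_cons.mp hy with rfl | hy'
        · exact hle
        · exact hall y hy'

-- the same, tracking a maximal key
theorem pv_foldl_sel_max (step : Option (Int × Int) → (Int × Int) → Option (Int × Int))
    (hstep : ∀ m x, step (some m) x = some m ∨ step (some m) x = some x)
    (hfst : ∀ m x r, step (some m) x = some r → m.1 ≤ r.1 ∧ x.1 ≤ r.1) :
    ∀ (xs : List (Int × Int)) (a m : Int × Int), xs.foldl step (some a) = some m →
      (m = a ∨ m ∈ xs) ∧ a.1 ≤ m.1 ∧ ∀ y ∈ xs, y.1 ≤ m.1 := by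
  intro xs
  induction xs with
  | nil => intro a m h; simp_all
  | cons x t ih =>
    intro a m h
    rw [List.foldl_cons] at h
    rcases hstep a x with hs | hs <;> rw [hs] at h
    · obtain ⟨hm, hle, hall⟩ := ih a m h
      obtain ⟨_, hx⟩ := hfst a x a hs
      refine ⟨?_, hle, ?_⟩
      · rcases hm with rfl | hm'
        · exact Or.inl rfl
        · exact Or.inr (List.mem_cons_of_mem _ hm')
      · intro y hy
        rcases List.mem_cons.mp hy with rfl | hy'
        · omega
        · exact hall y hy'
    · obtain ⟨hm, hle, hall⟩ := ih x m h
      obtain ⟨hxa, _⟩ := hfst a x x hs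
      refine ⟨?_, by omega, ?_⟩
      · rcases hm with rfl | hm'
        · exact Or.inr (List.mem_cons_self ..)
        · exact Or.inr (List.mem_cons_of_mem _ hm')
      · intro y hy
        rcases List.mem_cons.mp hy with rfl | hy'
        · exact hle
        · exact hall y hy'

theorem pv_min2_spec (xs : List (Int × Int)) (m : Int × Int)
    (h : PySem.List.min2? xs Prod.fst Prod.snd = some m) :
    m ∈ xs ∧ ∀ y ∈ xs, m.1 ≤ y.1 := by
  cases xs with
  | nil => simp [PySem.List.min2?] at h
  | cons x t =>
    rw [PySem.List.min2?, List.foldl_cons] at h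
    obtain ⟨hm, hle, hall⟩ := pv_foldl_sel_min _
      (by intro m x; dsimp only; split_ifs <;> simp)
      (by intro m x r hr; dsimp only at hr; split_ifs at hr with hc <;>
            simp only [Bool.or_eq_true, Bool.and_eq_true, decide_eq_true_eq, Bool.not_eq_true',
              decide_eq_false_iff_not] at hc <;> cases hr <;> constructor <;> omega)
      t x m h
    refine ⟨?_, ?_⟩
    · rcases hm with rfl | hm'
      · exact List.mem_cons_self ..
      · exact List.mem_cons_of_mem _ hm'
    · intro y hy
      rcases List.mem_cons.mp hy with rfl | hy'
      · exact hle
      · exact hall y hy'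

theorem pv_max2_spec (xs : List (Int × Int)) (m : Int × Int)
    (h : PySem.List.max2? xs Prod.fst Prod.snd = some m) :
    m ∈ xs ∧ ∀ y ∈ xs, y.1 ≤ m.1 := by
  cases xs with
  | nil => simp [PySem.List.max2?] at h
  | cons x t =>
    rw [PySem.List.max2?, List.foldl_cons] at h
    obtain ⟨hm, hle, hall⟩ := pv_foldl_sel_max _
      (by intro m x; dsimp only; split_ifs <;> simp)
      (by intro m x r hr; dsimp only at hr; split_ifs at hr with hc <;>
            simp only [Bool.or_eq_true, Bool.and_eq_true, decide_eq_true_eq, Bool.not_eq_true',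
              decide_eq_false_iff_not] at hc <;> cases hr <;> constructor <;> omega)
      t x m h
    refine ⟨?_, ?_⟩
    · rcases hm with rfl | hm'
      · exact List.mem_cons_self ..
      · exact List.mem_cons_of_mem _ hm'
    · intro y hy
      rcases List.mem_cons.mp hy with rfl | hy'
      · exact hle
      · exact hall y hy'

-- ---- rfind: highest matching index (proved against rfind.go's countdown) ----

theorem pv_rfind_go_spec (s sub : List Char) : ∀ i : Nat,
    (PySem.Chars.rfind.go s sub i = -1 ∧ ∀ j ≤ i, ¬ sub <+: s.drop j) ∨
    (∃ j, j ≤ i ∧ PySem.Chars.rfind.go s sub i = (j : Int) ∧ sub <+: s.drop j ∧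
      ∀ k, j < k → k ≤ i → ¬ sub <+: s.drop k) := by
  intro i
  induction i with
  | zero =>
    by_cases h : sub.isPrefixOf s = true
    · right
      exact ⟨0, le_refl 0, by simp [PySem.Chars.rfind.go, h],
        by simpa using List.isPrefixOf_iff_prefix.mp h, by omega⟩
    · left
      refine ⟨by simp [PySem.Chars.rfind.go, h], ?_⟩
      intro j hj hpre
      interval_cases j
      exact h (List.isPrefixOf_iff_prefix.mpr (by simpa using hpre))
  | succ n ih =>
    by_cases h : sub.isPrefixOf (s.drop (n + 1)) = true
    · right
      refine ⟨n + 1, le_refl _, by simp [PySem.Chars.rfind.go, h], ?_, by omega⟩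
      exact List.isPrefixOf_iff_prefix.mp h
    · have hstep : PySem.Chars.rfind.go s sub (n + 1) = PySem.Chars.rfind.go s sub n := by
        simp [PySem.Chars.rfind.go, h]
      have hnp : ¬ sub <+: s.drop (n + 1) := fun hp => h (List.isPrefixOf_iff_prefix.mpr hp)
      rcases ih with ⟨heq, hall⟩ | ⟨j, hj, heq, hpre, hmax⟩
      · left
        refine ⟨hstep.trans heq, ?_⟩
        intro j hj
        rcases Nat.lt_or_ge j (n + 1) with hlt | hge
        · exact hall j (by omega)
        · have : j = n + 1 := by omega
          subst this; exact hnp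
      · right
        refine ⟨j, by omega, hstep.trans heq, hpre, ?_⟩
        intro k hk1 hk2
        rcases Nat.lt_or_ge k (n + 1) with hlt | hge
        · exact hmax k hk1 (by omega)
        · have : k = n + 1 := by omega
          subst this; exact hnp

theorem pv_rfind_le {s sub : List Char} {j : Nat} (hj : sub <+: s.drop j) (hne : sub ≠ []) :
    (j : Int) ≤ PySem.Chars.rfind s sub := by
  have hjlt : j < s.length := pv_lt_of_match hne hj
  rcases pv_rfind_go_spec s sub s.length with ⟨_, hall⟩ | ⟨j', _, heq, _, hmax⟩
  · exact absurd hj (hall j (by omega))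
  · rw [PySem.Chars.rfind, heq]
    by_contra hlt
    exact hmax j (by omega) (by omega) hj

theorem pv_rfind_prefix {s sub : List Char} (h : 0 ≤ PySem.Chars.rfind s sub) :
    sub <+: s.drop (PySem.Chars.rfind s sub).toNat := by
  rcases pv_rfind_go_spec s sub s.length with ⟨heq, _⟩ | ⟨j', _, heq, hpre, _⟩
  · rw [PySem.Chars.rfind] at h; omega
  · rw [PySem.Chars.rfind, heq]
    simpa using hpre

-- ---- find: first matching index (from the library's find_spec) ----

theorem pv_infix_of_prefix_drop {s sub : List Char} {j : Nat} (h : sub <+: s.drop j) :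
    sub <:+: s :=
  (h.isInfix).trans (List.drop_suffix j s).isInfix

theorem pv_find_le {s sub : List Char} {j : Nat} (hj : sub <+: s.drop j) :
    PySem.Chars.find s sub ≤ (j : Int) := by
  have hnn : 0 ≤ PySem.Chars.find s sub :=
    (PySem.Chars.find_nonneg_iff _ _).mpr (pv_infix_of_prefix_drop hj)
  by_contra hlt
  exact (PySem.Chars.find_spec hnn).2 j (by omega) hj

-- ---- findSome? over an index range: first / last match ----

theorem pv_findSome?_range (g : Nat → Option Int) (n i : Nat) (v : Int) (hi : i < n)
    (hv : g i = some v) (hmin : ∀ j < i, g j = none) :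
    (List.range n).findSome? g = some v := by
  induction n with
  | zero => omega
  | succ m ih =>
    rw [List.range_succ, List.findSome?_append]
    by_cases him : i < m
    · rw [ih him]; rfl
    · have him' : m = i := by omega
      subst him'
      have h0 : (List.range m).findSome? g = none :=
        List.findSome?_eq_none_iff.mpr (fun j hj => hmin j (List.mem_range.mp hj))
      rw [h0]
      simp [hv]

theorem pv_findSome?_range_rev (g : Nat → Option Int) (n i : Nat) (v : Int) (hi : i < n)
    (hv : g i = some v) (hmax : ∀ j, i < j → j < n → g j = none) :
    ((List.range n).reverse).findSome? g = some v := by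
  induction n with
  | zero => omega
  | succ m ih =>
    have hrev : (List.range (m + 1)).reverse = m :: (List.range m).reverse := by
      rw [List.range_succ, List.reverse_append]; rfl
    rw [hrev, List.findSome?_cons]
    by_cases him : i = m
    · subst him; rw [hv]
    · have hm0 : g m = none := hmax m (by omega) (by omega)
      rw [hm0]
      exact ih (by omega) (fun j h1 h2 => hmax j h1 (by omega))

-- ---- B's loop keeps exactly (first match, last match) ----

theorem pv_fold_inv (s : List Char) : ∀ n : Nat,
    (List.range n).foldl (pvStep s) (none, none) =
      ((List.range n).findSome? (pvMatchAt s), ((List.range n).reverse).findSome? (pvMatchAt s)) := by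
  intro n
  induction n with
  | zero => simp
  | succ m ih =>
    have hrev : (List.range (m + 1)).reverse = m :: (List.range m).reverse := by
      rw [List.range_succ, List.reverse_append]; rfl
    rw [hrev, List.range_succ, List.foldl_append, ih]
    simp only [List.foldl_cons, List.foldl_nil, List.findSome?_append, List.findSome?_cons]
    unfold pvStep
    cases hm : pvMatchAt s m
    · simp
    · cases hfirst : (List.range m).findSome? (pvMatchAt s) <;> simp [hfirst]

-- ---- nonempty lists give the fold a result ----

theorem pv_foldl_sel_some (step : Option (Int × Int) → (Int × Int) → Option (Int × Int))
    (hstep : ∀ m x, step (some m) x = some m ∨ step (some m) x = some x) :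
    ∀ (xs : List (Int × Int)) (a : Int × Int), ∃ m, xs.foldl step (some a) = some m := by
  intro xs
  induction xs with
  | nil => exact fun a => ⟨a, rfl⟩
  | cons x t ih =>
    intro a
    rw [List.foldl_cons]
    rcases hstep a x with hs | hs <;> rw [hs] <;> exact ih _

theorem pv_min2_isSome (x : Int × Int) (t : List (Int × Int)) :
    ∃ m, PySem.List.min2? (x :: t) Prod.fst Prod.snd = some m := by
  rw [PySem.List.min2?, List.foldl_cons]
  exact pv_foldl_sel_some _ (by intro m y; dsimp only; split_ifs <;> simp) t x

theorem pv_max2_isSome (x : Int × Int) (t : List (Int × Int)) :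
    ∃ m, PySem.List.max2? (x :: t) Prod.fst Prod.snd = some m := by
  rw [PySem.List.max2?, List.foldl_cons]
  exact pv_foldl_sel_some _ (by intro m y; dsimp only; split_ifs <;> simp) t x

theorem pv_min2_of_ne_nil (xs : List (Int × Int)) (h : xs ≠ []) :
    ∃ m, PySem.List.min2? xs Prod.fst Prod.snd = some m := by
  cases xs with
  | nil => exact absurd rfl h
  | cons x t => exact pv_min2_isSome x t

theorem pv_max2_of_ne_nil (xs : List (Int × Int)) (h : xs ≠ []) :
    ∃ m, PySem.List.max2? xs Prod.fst Prod.snd = some m := by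
  cases xs with
  | nil => exact absurd rfl h
  | cons x t => exact pv_max2_isSome x t

-- ===== VERDICT (by name: the statement is the Claim_ definition above) =====
theorem p2_digits_from_line_spec : Claim_equal_p2_digits_from_line := by
  intro line hdom hpre
  unfold Spec_p2_digits_from_line
  unfold Pre_p2_digits_from_line at hpre
  rw [List.any_eq_true] at hpre
  obtain ⟨p0, hp0A, hp0in⟩ := hpre
  unfold p2_digits_from_line p2_digits_from_line_alt
  dsimp only
  set s := line.toList with hs
  set g := pvMatchAt s with hgdef
  set idx1 := pvTermsA.filterMap
    (fun p => if 0 ≤ PySem.Str.find line p.1 then some (PySem.Str.find line p.1, p.2) else none)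
    with hidx1
  set idx2 := pvTermsA.filterMap
    (fun p => if 0 ≤ PySem.Str.rfind line p.1 then some (PySem.Str.rfind line p.1, p.2) else none)
    with hidx2
  -- p0 occurs somewhere in line
  have h0inf : p0.1.toList <:+: s := by
    simpa [PySem.Chars.isIn_iff_infix] using hp0in
  have hq0B : (p0.1.toList, p0.2) ∈ pvTermsB := pv_A_sub_B p0 hp0A
  have h0ne : p0.1.toList ≠ [] := pv_ne_nil _ hq0B
  obtain ⟨j0, hj0⟩ : ∃ j, p0.1.toList <+: s.drop j := by
    rcases h0inf with ⟨pre, suf, hps⟩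
    exact ⟨pre.length, by rw [← hps, List.append_assoc, List.drop_left]; exact List.prefix_append ..⟩
  -- idx1 and idx2 are nonempty
  have h0find : 0 ≤ PySem.Str.find line p0.1 := by
    simp only [PySem.Str.find_eq]
    exact (PySem.Chars.find_nonneg_iff _ _).mpr h0inf
  have h0rfind : 0 ≤ PySem.Str.rfind line p0.1 := by
    simp only [PySem.Str.rfind_eq]
    exact le_trans (by omega) (pv_rfind_le hj0 h0ne)
  have hmem1 : (PySem.Str.find line p0.1, p0.2) ∈ idx1 :=
    List.mem_filterMap.mpr ⟨p0, hp0A, by rw [if_pos h0find]⟩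
  have hmem2 : (PySem.Str.rfind line p0.1, p0.2) ∈ idx2 :=
    List.mem_filterMap.mpr ⟨p0, hp0A, by rw [if_pos h0rfind]⟩
  obtain ⟨mn, hmn⟩ := pv_min2_of_ne_nil idx1 (List.ne_nil_of_mem hmem1)
  obtain ⟨mx, hmx⟩ := pv_max2_of_ne_nil idx2 (List.ne_nil_of_mem hmem2)
  obtain ⟨hmnmem, hmnmin⟩ := pv_min2_spec _ _ hmn
  obtain ⟨hmxmem, hmxmax⟩ := pv_max2_spec _ _ hmx
  -- ---- the first match of B is mn.2 ----
  obtain ⟨pa, hpaA, hifa⟩ := List.mem_filterMap.mp hmnmem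
  have hqaB : (pa.1.toList, pa.2) ∈ pvTermsB := pv_A_sub_B pa hpaA
  by_cases hfa : 0 ≤ PySem.Str.find line pa.1
  case neg => rw [if_neg hfa] at hifa; cases hifa
  rw [if_pos hfa] at hifa
  have hmn1 : mn.1 = PySem.Chars.find s pa.1.toList := by
    have := congrArg Prod.fst (Option.some.inj hifa)
    simpa [PySem.Str.find_eq] using this.symm
  have hmn2 : mn.2 = pa.2 := (congrArg Prod.snd (Option.some.inj hifa)).symm
  have hfa' : 0 ≤ PySem.Chars.find s pa.1.toList := by
    simpa [PySem.Str.find_eq] using hfa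
  have hpref : pa.1.toList <+: s.drop (PySem.Chars.find s pa.1.toList).toNat :=
    (PySem.Chars.find_spec hfa').1
  have hlt1 : (PySem.Chars.find s pa.1.toList).toNat < s.length :=
    pv_lt_of_match (pv_ne_nil _ hqaB) hpref
  have hgi : g (PySem.Chars.find s pa.1.toList).toNat = some mn.2 :=
    (pv_matchAt_some_iff s _ mn.2).mpr ⟨(pa.1.toList, pa.2), hqaB, hpref, hmn2.symm⟩
  have hnone1 : ∀ j < (PySem.Chars.find s pa.1.toList).toNat, g j = none := by
    intro j hj
    cases hgj : g j with
    | none => rfl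
    | some v =>
      exfalso
      obtain ⟨q', hq'B, hq'pre, _⟩ := (pv_matchAt_some_iff s j v).mp hgj
      obtain ⟨p', hp'A, hp'eq1, _⟩ := pv_B_sub_A q' hq'B
      have hfle : PySem.Chars.find s p'.1.toList ≤ (j : Int) :=
        pv_find_le (hp'eq1 ▸ hq'pre)
      have hfnn : 0 ≤ PySem.Str.find line p'.1 := by
        simp only [PySem.Str.find_eq]
        exact (PySem.Chars.find_nonneg_iff _ _).mpr (pv_infix_of_prefix_drop (hp'eq1 ▸ hq'pre))
      have hmem' : (PySem.Str.find line p'.1, p'.2) ∈ idx1 :=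
        List.mem_filterMap.mpr ⟨p', hp'A, by rw [if_pos hfnn]⟩
      have hle := hmnmin _ hmem'
      simp only [PySem.Str.find_eq] at hle
      rw [← hs] at hle
      rw [hmn1] at hle
      omega
  have hfirst : (List.range s.length).findSome? g = some mn.2 :=
    pv_findSome?_range g s.length _ mn.2 hlt1 hgi hnone1
  -- ---- the last match of B is mx.2 ----
  obtain ⟨pb, hpbA, hifb⟩ := List.mem_filterMap.mp hmxmem
  have hqbB : (pb.1.toList, pb.2) ∈ pvTermsB := pv_A_sub_B pb hpbA
  by_cases hfb : 0 ≤ PySem.Str.rfind line pb.1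
  case neg => rw [if_neg hfb] at hifb; cases hifb
  rw [if_pos hfb] at hifb
  have hmx1 : mx.1 = PySem.Chars.rfind s pb.1.toList := by
    have := congrArg Prod.fst (Option.some.inj hifb)
    simpa [PySem.Str.rfind_eq] using this.symm
  have hmx2 : mx.2 = pb.2 := (congrArg Prod.snd (Option.some.inj hifb)).symm
  have hfb' : 0 ≤ PySem.Chars.rfind s pb.1.toList := by
    simpa [PySem.Str.rfind_eq] using hfb
  have hprefb : pb.1.toList <+: s.drop (PySem.Chars.rfind s pb.1.toList).toNat :=
    pv_rfind_prefix hfb'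
  have hlt2 : (PySem.Chars.rfind s pb.1.toList).toNat < s.length :=
    pv_lt_of_match (pv_ne_nil _ hqbB) hprefb
  have hgib : g (PySem.Chars.rfind s pb.1.toList).toNat = some mx.2 :=
    (pv_matchAt_some_iff s _ mx.2).mpr ⟨(pb.1.toList, pb.2), hqbB, hprefb, hmx2.symm⟩
  have hnone2 : ∀ j, (PySem.Chars.rfind s pb.1.toList).toNat < j → j < s.length → g j = none := by
    intro j hj hjn
    cases hgj : g j with
    | none => rfl
    | some v =>
      exfalso
      obtain ⟨q', hq'B, hq'pre, _⟩ := (pv_matchAt_some_iff s j v).mp hgj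
      obtain ⟨p', hp'A, hp'eq1, _⟩ := pv_B_sub_A q' hq'B
      have hrge : (j : Int) ≤ PySem.Chars.rfind s p'.1.toList :=
        pv_rfind_le (hp'eq1 ▸ hq'pre) (hp'eq1 ▸ pv_ne_nil _ hq'B)
      have hrnn : 0 ≤ PySem.Str.rfind line p'.1 := by
        simp only [PySem.Str.rfind_eq]
        rw [← hs]
        omega
      have hmem' : (PySem.Str.rfind line p'.1, p'.2) ∈ idx2 :=
        List.mem_filterMap.mpr ⟨p', hp'A, by rw [if_pos hrnn]⟩
      have hle := hmxmax _ hmem'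
      simp only [PySem.Str.rfind_eq] at hle
      rw [← hs] at hle
      rw [hmx1] at hle
      omega
  have hlast : ((List.range s.length).reverse).findSome? g = some mx.2 :=
    pv_findSome?_range_rev g s.length _ mx.2 hlt2 hgib hnone2
  -- ---- assemble ----
  rw [hmn, hmx, pv_fold_inv s s.length, hfirst, hlast]
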